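-- pv_equiv track=rewrite | github.com/robbert-harms/MOT | pppe/cl_routines/smoothing/base.py | _get_ks_sub2ind_func
-- ===== SOURCE A (Python) =====
-- def _get_ks_sub2ind_func(volume_shape):
--     """Get the kernel source part for converting array subscripts to indices"""
--     s = 'int sub2ind('
--     for i in range(len(volume_shape)):
--         s += 'const int dim' + repr(i) + ', '
--     s = s[0:-2] + '){' + "\n"
--     s += "\t" * 2 + 'return '
--     for i, d in enumerate(volume_shape):
--         stride = ''
--         for ds in volume_shape[(i + 1):]:
--             stride += ' * ' + repr(ds)
--         s += 'dim' + repr(i) + stride + ' + '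
--     s = s[0:-3] + ';' + "\n"
--     s += "\t" * 1 + '}' + "\n"
--     return s
-- ===== SOURCE B (Python) =====
-- def _get_ks_sub2ind_func(volume_shape):
--     """Get the kernel source part for converting array subscripts to indices"""
--     header = 'int sub2ind(' + ''.join(
--         'const int dim' + repr(i) + ', ' for i in range(len(volume_shape)))
--     header = header[0:-2] + '){\n\t\treturn '
--     # single right-to-left pass: acc accumulates the ' * d' stride string of the suffix
--     parts = []
--     acc = ''
--     for i, d in zip(range(len(volume_shape) - 1, -1, -1), reversed(volume_shape)):
--         parts.append('dim' + repr(i) + acc + ' + ')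
--         acc = ' * ' + repr(d) + acc
--     body = header + ''.join(reversed(parts))
--     return body[0:-3] + ';\n\t}\n'
-- ===== Notes on version B (the rewrite author's own statement) =====
-- stated objective: alternative
-- what changed: Replaces A's nested loop (which rebuilds every stride suffix from scratch with an inner scan and repeated += on the growing result string) by a single right-to-left pass that accumulates the stride string incrementally, collects the terms in a list and joins them once; the trailing-separator trim idiom is kept so degenerate shapes match byte-for-byte.
import Mathlib
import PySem

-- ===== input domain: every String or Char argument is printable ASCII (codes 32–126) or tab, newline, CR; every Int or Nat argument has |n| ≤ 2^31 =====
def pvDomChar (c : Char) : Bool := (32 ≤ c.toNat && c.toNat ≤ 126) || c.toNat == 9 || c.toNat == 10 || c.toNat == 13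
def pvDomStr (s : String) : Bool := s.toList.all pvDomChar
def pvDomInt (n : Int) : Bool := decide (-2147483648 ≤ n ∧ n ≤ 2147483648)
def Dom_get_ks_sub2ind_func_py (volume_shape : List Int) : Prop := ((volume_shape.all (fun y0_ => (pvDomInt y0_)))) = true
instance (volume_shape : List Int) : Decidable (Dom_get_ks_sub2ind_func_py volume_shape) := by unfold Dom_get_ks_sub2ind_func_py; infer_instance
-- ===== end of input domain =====

-- B replaces A's nested stride-rebuilding loop by a single right-to-left pass that accumulates the stride string and joins the terms once (alternative decomposition; same output byte-for-byte).


-- ===== PORT A =====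
-- s = 'int sub2ind('; for i in range(len(volume_shape)): s += 'const int dim' + repr(i) + ', '
def pvAHeaderLoop (volume_shape : List Int) : String :=
  (PySem.List.pyRange 0 (volume_shape.length : Int) 1).foldl
    (fun s i => s ++ ("const int dim" ++ PySem.Int.toStr i ++ ", ")) "int sub2ind("

-- for i, d in enumerate(volume_shape): stride = ''; for ds in volume_shape[(i+1):]: stride += ' * ' + repr(ds); s += 'dim' + repr(i) + stride + ' + '
def pvATermsLoop (volume_shape : List Int) (init : String) : String :=
  (PySem.List.enumerate volume_shape).foldl
    (fun s p =>
      let stride := (PySem.List.slice volume_shape (some (p.1 + 1)) none).foldl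
          (fun st ds => st ++ (" * " ++ PySem.Int.toStr ds)) ""
      s ++ ("dim" ++ PySem.Int.toStr p.1 ++ stride ++ " + ")) init

def get_ks_sub2ind_func_py (volume_shape : List Int) : String :=
  -- s = s[0:-2] + '){' + '\n';  s += '\t'*2 + 'return '
  let s2 := (PySem.Str.slice (pvAHeaderLoop volume_shape) (some 0) (some (-2)))
      ++ "){" ++ "\n" ++ "\t\t" ++ "return "
  -- s = s[0:-3] + ';' + '\n';  s += '\t'*1 + '}' + '\n'
  (PySem.Str.slice (pvATermsLoop volume_shape s2) (some 0) (some (-3)))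
    ++ ";" ++ "\n" ++ "\t" ++ "}" ++ "\n"

-- ===== PORT B =====
-- single right-to-left pass: for i, d in zip(range(n-1,-1,-1), reversed(volume_shape)):
--   parts.append('dim'+repr(i)+acc+' + '); acc = ' * '+repr(d)+acc
def pvBPass (volume_shape : List Int) : List String × String :=
  (List.zip (PySem.List.pyRange ((volume_shape.length : Int) - 1) (-1) (-1)) volume_shape.reverse).foldl
    (fun st p =>
      (st.1 ++ ["dim" ++ PySem.Int.toStr p.1 ++ st.2 ++ " + "],
       " * " ++ PySem.Int.toStr p.2 ++ st.2)) ([], "")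

def get_ks_sub2ind_func_py_alt (volume_shape : List Int) : String :=
  let header := "int sub2ind(" ++ String.join
      ((PySem.List.pyRange 0 (volume_shape.length : Int) 1).map
        (fun i => "const int dim" ++ PySem.Int.toStr i ++ ", "))
  let header2 := (PySem.Str.slice header (some 0) (some (-2))) ++ "){\n\t\treturn "
  let body := header2 ++ String.join (pvBPass volume_shape).1.reverse
  (PySem.Str.slice body (some 0) (some (-3))) ++ ";\n\t}\n"

-- ===== PRECONDITION & SPEC =====
def Spec_get_ks_sub2ind_func_py (volume_shape : List Int) (out : String) : Prop := out = get_ks_sub2ind_func_py_alt volume_shape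
instance (volume_shape : List Int) (out : String) : Decidable (Spec_get_ks_sub2ind_func_py volume_shape out) := by unfold Spec_get_ks_sub2ind_func_py; infer_instance

-- ===== CLAIM (what is proved, stated in full; the proofs are below) =====
def Claim_equal_get_ks_sub2ind_func_py : Prop := ∀ (volume_shape : List Int), Dom_get_ks_sub2ind_func_py volume_shape → Spec_get_ks_sub2ind_func_py volume_shape (get_ks_sub2ind_func_py volume_shape)

-- ===== LEMMAS AND PROOFS =====

-- stride string of a suffix, appended onto a0 (what B's acc holds)
def pvStride : List Int → String → String
  | [], a0 => a0
  | d :: t, a0 => " * " ++ PySem.Int.toStr d ++ pvStride t a0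

-- the term fragments in ascending-index order (what B's reversed parts list holds)
def pvAsc (i0 : Int) : List Int → String → List String
  | [], _ => []
  | _ :: t, a0 => ("dim" ++ PySem.Int.toStr i0 ++ pvStride t a0 ++ " + ") :: pvAsc (i0 + 1) t a0

theorem pvStrFoldlStart (l : List String) : ∀ init, l.foldl (· ++ ·) init = init ++ l.foldl (· ++ ·) "" := by
  induction l with
  | nil => intro init; simp
  | cons a t ih =>
    intro init; simp only [List.foldl]
    rw [ih (init ++ a), ih ("" ++ a)]; simp [String.append_assoc]

theorem pvStrJoinCons (s : String) (l : List String) : String.join (s :: l) = s ++ String.join l := by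
  simp only [String.join, List.foldl]; rw [pvStrFoldlStart l ("" ++ s)]; simp

-- 's += f x' over a list equals the join of the mapped fragments
theorem pvFoldlAppend {α : Type} (f : α → String) (l : List α) :
    ∀ init, l.foldl (fun s x => s ++ f x) init = init ++ String.join (l.map f) := by
  induction l with
  | nil => intro init; simp [String.join]
  | cons x t ih =>
    intro init; simp only [List.foldl, List.map]
    rw [ih (init ++ f x), pvStrJoinCons, String.append_assoc]

theorem pvStride_eq_join (l : List Int) :
    pvStride l "" = String.join (l.map (fun ds => " * " ++ PySem.Int.toStr ds)) := by
  induction l with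
  | nil => simp [pvStride, String.join]
  | cons d t ih => simp only [pvStride, List.map]; rw [pvStrJoinCons, ih, String.append_assoc]

-- range(i0 + k, i0 - 1, -1) peels its LAST element i0
theorem pvRangeSplit (i0 : Int) (k : Nat) :
    PySem.List.pyRange (i0 + k) (i0 - 1) (-1) = PySem.List.pyRange (i0 + k) i0 (-1) ++ [i0] := by
  rw [PySem.List.pyRange_neg_one_eq_reverse (i0 + k) (i0 - 1)]
  have h1 : i0 - 1 + 1 = i0 := by ring
  rw [h1, PySem.List.pyRange_one_cons (show i0 < i0 + (k : Int) + 1 by omega)]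
  rw [List.reverse_cons, PySem.List.pyRange_neg_one_eq_reverse (i0 + k) i0]

-- B's fold: the invariant of the right-to-left pass
theorem pvZipFold (l : List Int) : ∀ (i0 : Int) (parts : List String) (a0 : String),
    (List.zip (PySem.List.pyRange (i0 + l.length - 1) (i0 - 1) (-1)) l.reverse).foldl
      (fun st p =>
        (st.1 ++ ["dim" ++ PySem.Int.toStr p.1 ++ st.2 ++ " + "],
         " * " ++ PySem.Int.toStr p.2 ++ st.2)) (parts, a0)
    = (parts ++ (pvAsc i0 l a0).reverse, pvStride l a0) := by
  induction l with
  | nil =>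
    intro i0 parts a0
    simp [pvAsc, pvStride]
  | cons d t ih =>
    intro i0 parts a0
    have harg : i0 + ((d :: t).length : Int) - 1 = i0 + (t.length : Int) := by
      simp; ring
    rw [harg, pvRangeSplit i0 t.length, List.reverse_cons,
      List.zip_append (by simp [PySem.List.length_pyRange_neg_one]),
      List.foldl_append]
    have h1 : (i0 + 1) + (t.length : Int) - 1 = i0 + (t.length : Int) := by ring
    have h2 : (i0 + 1) - 1 = i0 := by ring
    have ih' := ih (i0 + 1) parts a0
    rw [h1, h2] at ih'
    rw [ih']
    simp [pvAsc, pvStride, List.reverse_cons, List.append_assoc]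

-- A's enumerate loop over the suffix 'suf' of the full list produces the joined ascending terms
theorem pvLoopEq (full : List Int) :
    ∀ (suf pre : List Int) (init : String), full = pre ++ suf →
    (PySem.List.enumerate suf (pre.length : Int)).foldl
      (fun s p =>
        let stride := (PySem.List.slice full (some (p.1 + 1)) none).foldl
            (fun st ds => st ++ (" * " ++ PySem.Int.toStr ds)) ""
        s ++ ("dim" ++ PySem.Int.toStr p.1 ++ stride ++ " + ")) init
    = init ++ String.join (pvAsc (pre.length : Int) suf "") := by
  intro suf
  induction suf with
  | nil => intro pre init _; simp [PySem.List.enumerate_nil, pvAsc, String.join]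
  | cons d t ih =>
    intro pre init hfull
    have hslice : PySem.List.slice full (some ((pre.length : Int) + 1)) none = t := by
      have h1 : ((pre.length : Int) + 1) = ((pre.length + 1 : Nat) : Int) := by push_cast; ring
      rw [h1, PySem.List.slice_from_natCast, hfull]
      have h2 : pre ++ d :: t = (pre ++ [d]) ++ t := by simp
      rw [h2, List.drop_left' (by simp)]
    have hrec := ih (pre ++ [d])
      (init ++ ("dim" ++ PySem.Int.toStr (pre.length : Int)
        ++ ((PySem.List.slice full (some ((pre.length : Int) + 1)) none).foldl
            (fun st ds => st ++ (" * " ++ PySem.Int.toStr ds)) "") ++ " + "))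
      (by simp [hfull])
    simp only [List.length_append, List.length_cons, List.length_nil, Nat.cast_add,
      Nat.cast_one, zero_add] at hrec
    rw [PySem.List.enumerate_cons]
    simp only [List.foldl]
    rw [hrec]
    have hstride : (t.foldl (fun st ds => st ++ (" * " ++ PySem.Int.toStr ds)) "")
        = pvStride t "" := by
      rw [pvFoldlAppend (fun ds => " * " ++ PySem.Int.toStr ds) t "", pvStride_eq_join]
      simp
    simp only [pvAsc]
    rw [pvStrJoinCons]
    simp [hslice, hstride, String.append_assoc]

theorem pvLitHeader (x : String) : x ++ "){" ++ "\n" ++ "\t\t" ++ "return " = x ++ "){\n\t\treturn " := by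
  rw [String.append_assoc, String.append_assoc, String.append_assoc]
  congr 1

theorem pvLitFooter (x : String) : x ++ ";" ++ "\n" ++ "\t" ++ "}" ++ "\n" = x ++ ";\n\t}\n" := by
  rw [String.append_assoc, String.append_assoc, String.append_assoc, String.append_assoc]
  congr 1

-- ===== VERDICT (by name: the statement is the Claim_ definition above) =====
theorem get_ks_sub2ind_func_py_spec : Claim_equal_get_ks_sub2ind_func_py := by
  intro v _
  show get_ks_sub2ind_func_py v = get_ks_sub2ind_func_py_alt v
  simp only [get_ks_sub2ind_func_py, get_ks_sub2ind_func_py_alt, pvATermsLoop, pvAHeaderLoop,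
    pvBPass]
  rw [pvFoldlAppend (fun i => "const int dim" ++ PySem.Int.toStr i ++ ", ")
      (PySem.List.pyRange 0 (v.length : Int) 1) "int sub2ind("]
  have h2 := fun init => pvLoopEq v v [] init rfl
  simp only [List.length_nil, Nat.cast_zero] at h2
  have h3 := pvZipFold v 0 [] ""
  have h4 : (0 : Int) + (v.length : Int) - 1 = (v.length : Int) - 1 := by ring
  have h5 : (0 : Int) - 1 = (-1 : Int) := by ring
  rw [h4, h5] at h3
  rw [pvLitFooter, ← pvLitHeader, h2, h3]
  simp
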